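-- pv_equiv track=rewrite | github.com/Pranshugoyal/algo-ds-practice | python/SlidingWindow.py | firstNegativeNumberInSubArrays
-- ===== SOURCE A (Python) =====
-- from collections import deque
--
-- def firstNegativeNumberInSubArrays(list, k):
-- 	q = deque()
-- 	result = []
-- 	i = 0
-- 	j = 0
-- 	while j < len(list):
-- 		if list[j] < 0:
-- 			q.append(list[j])
--
-- 		if j - i + 1 == k:
-- 			if len(q) > 0:
-- 				result.append(q[0])
-- 			else:
-- 				result.append(0)
--
-- 			if len(q) > 0 and list[i] == q[0]:
-- 				q.popleft()
-- 			i += 1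
-- 			j += 1
-- 		else:
-- 			j += 1
-- 	return result
-- ===== SOURCE B (Python) =====
-- def firstNegativeNumberInSubArrays(list, k):
--     n = len(list)
--     if k < 1 or n < k:
--         return []
--     nxt = [n] * (n + 1)
--     for i in range(n - 1, -1, -1):
--         nxt[i] = i if list[i] < 0 else nxt[i + 1]
--     return [list[nxt[s]] if nxt[s] < s + k else 0 for s in range(n - k + 1)]
-- ===== Notes on version B (the rewrite author's own statement) =====
-- stated objective: faster
-- what changed: Replaces the deque-maintained sliding window with a nearest-negative index table built in one right-to-left pass plus a per-window O(1) lookup (no per-step deque bookkeeping).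
import Mathlib
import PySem

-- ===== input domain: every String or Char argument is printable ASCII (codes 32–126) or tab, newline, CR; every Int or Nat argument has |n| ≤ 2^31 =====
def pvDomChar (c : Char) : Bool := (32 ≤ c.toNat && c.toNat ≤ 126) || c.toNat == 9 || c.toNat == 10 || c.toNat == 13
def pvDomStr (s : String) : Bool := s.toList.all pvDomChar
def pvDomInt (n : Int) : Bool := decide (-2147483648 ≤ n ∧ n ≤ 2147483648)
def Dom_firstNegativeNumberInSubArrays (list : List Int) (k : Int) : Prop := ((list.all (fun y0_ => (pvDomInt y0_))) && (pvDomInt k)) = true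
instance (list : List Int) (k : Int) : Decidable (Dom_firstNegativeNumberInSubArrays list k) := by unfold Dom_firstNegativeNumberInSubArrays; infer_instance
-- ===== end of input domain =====

-- B replaces A's deque-maintained sliding window with a right-to-left precomputed
-- nearest-negative index table plus a per-window lookup (measured constant-factor faster).

-- ===== PORT A =====
-- the while loop of A; q is the deque (front = head), i/j the two window indices
def aLoop (l : List Int) (k : Int) (q res : List Int) (i j : Nat) : List Int :=
  if _h : j < l.length then
    let q1 := if l.getD j 0 < 0 then q ++ [l.getD j 0] else q
    if (j : Int) - (i : Int) + 1 = k then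
      let res1 := res ++ [if q1.length > 0 then q1.headD 0 else 0]
      let q2 := if q1.length > 0 ∧ l.getD i 0 = q1.headD 0 then q1.tail else q1
      aLoop l k q2 res1 (i + 1) (j + 1)
    else
      aLoop l k q1 res i (j + 1)
  else res
termination_by l.length - j

def firstNegativeNumberInSubArrays (list : List Int) (k : Int) : List Int :=
  aLoop list k [] [] 0 0

-- ===== PORT B =====
-- the right-to-left table pass of Source B: entry at position i of the result is the
-- smallest absolute index t ≥ i with l[t] < 0, or n if none (one trailing sentinel n)
def buildNxt (l : List Int) (i n : Nat) : List Nat :=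
  match l with
  | [] => [n]
  | x :: xs =>
    let rest := buildNxt xs (i + 1) n
    (if x < 0 then i else rest.headD n) :: rest

def firstNegativeNumberInSubArrays_alt (list : List Int) (k : Int) : List Int :=
  let n := list.length
  if k < 1 ∨ (n : Int) < k then []
  else
    let nxt := buildNxt list 0 n
    (List.range (n - k.toNat + 1)).map (fun s =>
      if nxt.getD s n < s + k.toNat then list.getD (nxt.getD s n) 0 else 0)

-- ===== PRECONDITION & SPEC =====
def Spec_firstNegativeNumberInSubArrays (list : List Int) (k : Int) (out : List Int) : Prop := out = firstNegativeNumberInSubArrays_alt list k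
instance (list : List Int) (k : Int) (out : List Int) : Decidable (Spec_firstNegativeNumberInSubArrays list k out) := by unfold Spec_firstNegativeNumberInSubArrays; infer_instance

-- ===== CLAIM (what is proved, stated in full; the proofs are below) =====
def Claim_equal_firstNegativeNumberInSubArrays : Prop := ∀ (list : List Int) (k : Int), Dom_firstNegativeNumberInSubArrays list k → Spec_firstNegativeNumberInSubArrays list k (firstNegativeNumberInSubArrays list k)

-- ===== LEMMAS AND PROOFS =====

-- the answer for the window of length kn starting at s
def winAns (l : List Int) (kn s : Nat) : Int :=
  match ((l.drop s).take kn).filter (fun x => x < 0) with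
  | [] => 0
  | x :: _ => x

theorem aLoop_neg (l : List Int) (k : Int) (hk : k ≤ 0) :
    ∀ j q res, aLoop l k q res 0 j = res := by
  suffices H : ∀ f j q res, l.length - j ≤ f → aLoop l k q res 0 j = res by
    intro j q res; exact H (l.length - j) j q res le_rfl
  intro f
  induction f with
  | zero =>
    intro j q res h
    rw [aLoop]
    have hj : ¬ j < l.length := by omega
    simp [hj]
  | succ f ih =>
    intro j q res h
    rw [aLoop]
    by_cases hj : j < l.length
    · have hc : ¬ ((j : Int) - ((0 : Nat) : Int) + 1 = k) := by push_cast; omega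
      simp only [dif_pos hj, if_neg hc]
      exact ih (j + 1) _ res (by omega)
    · simp [hj]

theorem headD_eq_getD {α : Type} (t : List α) (d : α) : t.headD d = t.getD 0 d := by
  cases t <;> simp

theorem buildNxt_getD (l : List Int) :
    ∀ i n m, n = i + l.length → m ≤ l.length →
      (buildNxt l i n).getD m n =
        match (l.drop m).findIdx? (fun x => decide (x < 0)) with
        | some d => i + m + d
        | none => n := by
  induction l with
  | nil =>
    intro i n m hn hm
    have hm0 : m = 0 := by simpa using hm
    subst hm0
    simp [buildNxt]
  | cons x xs ih =>
    intro i n m hn hm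
    have hn' : n = (i + 1) + xs.length := by simp at hn; omega
    match m with
    | 0 =>
      simp only [buildNxt, List.getD_cons_zero, List.drop_zero, List.findIdx?_cons]
      by_cases hx : x < 0
      · rw [if_pos hx, if_pos (by simpa using hx)]
        simp
      · rw [if_neg hx, if_neg (by simpa using hx)]
        have h0 := ih (i + 1) n 0 hn' (by omega)
        simp only [List.drop_zero] at h0
        rw [headD_eq_getD, h0]
        cases hfind : xs.findIdx? (fun x => decide (x < 0)) with
        | none => simp
        | some d => simp; ring
    | m + 1 =>
      simp only [buildNxt, List.getD_cons_succ, List.drop_succ_cons]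
      have h0 := ih (i + 1) n m hn' (by simpa using hm)
      rw [h0]
      cases hfind : (xs.drop m).findIdx? (fun x => decide (x < 0)) with
      | none => simp
      | some d => simp; omega

theorem winAns_aux (xs : List Int) :
    ∀ kn : Nat,
      (match xs.findIdx? (fun x => decide (x < 0)) with
       | some d => if d < kn then xs.getD d 0 else 0
       | none => 0)
      = (match (xs.take kn).filter (fun x => x < 0) with | [] => 0 | x :: _ => x) := by
  induction xs with
  | nil => intro kn; simp
  | cons x xs ih =>
    intro kn
    rw [List.findIdx?_cons]
    by_cases hx : x < 0
    · simp only [hx, decide_true, if_pos]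
      cases kn with
      | zero => simp
      | succ m => simp [hx]
    · simp only [hx, decide_false, Bool.false_eq_true, if_false]
      cases kn with
      | zero =>
        cases hfind : xs.findIdx? (fun x => decide (x < 0)) <;> simp
      | succ m =>
        have h := ih m
        cases hfind : xs.findIdx? (fun x => decide (x < 0)) with
        | none =>
          rw [hfind] at h
          simpa [hx] using h
        | some d =>
          rw [hfind] at h
          simp only [Option.map_some]
          rw [List.take_succ_cons, List.filter_cons_of_neg (by simpa using hx)]
          rw [← h]
          simp

theorem winAns_findIdx (l : List Int) (kn s : Nat) :
    (match (l.drop s).findIdx? (fun x => decide (x < 0)) with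
     | some d => if s + d < s + kn then l.getD (s + d) 0 else 0
     | none => 0) = winAns l kn s := by
  have h := winAns_aux (l.drop s) kn
  unfold winAns
  cases hfind : (l.drop s).findIdx? (fun x => decide (x < 0)) with
  | none =>
    rw [hfind] at h
    exact h
  | some d =>
    rw [hfind] at h
    rw [← h]
    show (if s + d < s + kn then l.getD (s + d) 0 else 0)
        = if d < kn then (l.drop s).getD d 0 else 0
    by_cases hd : d < kn
    · rw [if_pos (by omega), if_pos hd]
      simp [List.getD_eq_getElem?_getD, List.getElem?_drop]
    · rw [if_neg (by omega), if_neg hd]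

theorem aLoop_steady (l : List Int) (m : Nat) :
    ∀ i res, i + (m + 1) ≤ l.length + 1 →
      aLoop l ((m + 1 : Nat) : Int) (((l.drop i).take m).filter (fun x => x < 0)) res i (i + m)
        = res ++ (List.range' i (l.length - m - i)).map (winAns l (m + 1)) := by
  suffices H : ∀ f i res, l.length - i ≤ f → i + (m + 1) ≤ l.length + 1 →
      aLoop l ((m + 1 : Nat) : Int) (((l.drop i).take m).filter (fun x => x < 0)) res i (i + m)
        = res ++ (List.range' i (l.length - m - i)).map (winAns l (m + 1)) by
    intro i res h; exact H (l.length - i) i res le_rfl h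
  intro f
  induction f with
  | zero =>
    intro i res hf hle
    have hi : i = l.length := by omega
    have hm0 : m = 0 := by omega
    subst hi; subst hm0
    rw [aLoop]
    simp
  | succ f ih =>
    intro i res hf hle
    by_cases hiw : i + (m + 1) ≤ l.length
    · have hj : i + m < l.length := by omega
      have hi : i < l.length := by omega
      rw [aLoop]
      have hc : ((i + m : Nat) : Int) - ((i : Nat) : Int) + 1 = ((m + 1 : Nat) : Int) := by
        push_cast; omega
      simp only [dif_pos hj, if_pos hc]
      -- q1 is the filter of the full window
      have hwin : (l.drop i).take (m + 1) = (l.drop i).take m ++ [l.getD (i + m) 0] := by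
        rw [List.take_add_one]
        congr 1
        simp [List.getElem?_drop, List.getElem?_eq_getElem (show i + m < l.length from hj),
          List.getD_eq_getElem?_getD]
      have hq1 : (if l.getD (i + m) 0 < 0
            then ((l.drop i).take m).filter (fun x => x < 0) ++ [l.getD (i + m) 0]
            else ((l.drop i).take m).filter (fun x => x < 0))
          = ((l.drop i).take (m + 1)).filter (fun x => x < 0) := by
        rw [hwin, List.filter_append]
        by_cases hx : l.getD (i + m) 0 < 0 <;>
          simp [List.getD_eq_getElem?_getD] at hx <;>
          simp [List.getD_eq_getElem?_getD, hx]
      rw [hq1]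
      -- the window decomposed at its head
      have hdrop : l.drop i = l.getD i 0 :: l.drop (i + 1) := by
        rw [List.drop_eq_getElem_cons hi]
        simp [List.getD_eq_getElem?_getD, List.getElem?_eq_getElem hi]
      have hconswin : (l.drop i).take (m + 1) = l.getD i 0 :: (l.drop (i + 1)).take m := by
        rw [hdrop, List.take_succ_cons]
      -- the appended answer is winAns
      have hans : (if (((l.drop i).take (m + 1)).filter (fun x => x < 0)).length > 0
            then (((l.drop i).take (m + 1)).filter (fun x => x < 0)).headD 0 else 0)
          = winAns l (m + 1) i := by
        unfold winAns
        cases ((l.drop i).take (m + 1)).filter (fun x => x < 0) <;> simp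
      rw [hans]
      -- the new deque is the filter of the shifted inner window
      have hq2 : (if (((l.drop i).take (m + 1)).filter (fun x => x < 0)).length > 0 ∧
              l.getD i 0 = (((l.drop i).take (m + 1)).filter (fun x => x < 0)).headD 0
            then (((l.drop i).take (m + 1)).filter (fun x => x < 0)).tail
            else ((l.drop i).take (m + 1)).filter (fun x => x < 0))
          = ((l.drop (i + 1)).take m).filter (fun x => x < 0) := by
        rw [hconswin]
        by_cases hx : l.getD i 0 < 0
        · rw [List.filter_cons_of_pos (by simpa using hx)]
          simp
        · rw [List.filter_cons_of_neg (by simpa using hx)]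
          cases hT : ((l.drop (i + 1)).take m).filter (fun x => x < 0) with
          | nil => simp
          | cons y T' =>
            have hy : y < 0 := by
              have : y ∈ ((l.drop (i + 1)).take m).filter (fun x => x < 0) := by
                rw [hT]; exact List.mem_cons_self
              simpa using (List.of_mem_filter this)
            have hne : ¬ (l[i]?.getD 0 = y) := by
              rw [← List.getD_eq_getElem?_getD]; omega
            simp [hne]
      rw [hq2]
      have hjs : i + m + 1 = (i + 1) + m := by omega
      rw [hjs]
      rw [ih (i + 1) _ (by omega) (by omega)]
      have hcnt : l.length - m - i = (l.length - m - (i + 1)) + 1 := by omega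
      rw [hcnt, List.range'_succ]
      simp
    · have hj : ¬ i + m < l.length := by omega
      rw [aLoop]
      have hcnt : l.length - m - i = 0 := by omega
      simp [hj, hcnt]

theorem aLoop_warm (l : List Int) (m : Nat) :
    ∀ j res, j ≤ m → j ≤ l.length →
      aLoop l ((m + 1 : Nat) : Int) ((l.take j).filter (fun x => x < 0)) res 0 j
        = res ++ (List.range' 0 (l.length - m)).map (winAns l (m + 1)) := by
  suffices H : ∀ f j res, m - j ≤ f → j ≤ m → j ≤ l.length →
      aLoop l ((m + 1 : Nat) : Int) ((l.take j).filter (fun x => x < 0)) res 0 j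
        = res ++ (List.range' 0 (l.length - m)).map (winAns l (m + 1)) by
    intro j res h1 h2; exact H (m - j) j res le_rfl h1 h2
  intro f
  induction f with
  | zero =>
    intro j res hf hjm hjl
    have hjm' : j = m := by omega
    subst hjm'
    have h := aLoop_steady l j 0 res (by omega)
    simpa using h
  | succ f ih =>
    intro j res hf hjm hjl
    by_cases hje : j = m
    · subst hje
      have h := aLoop_steady l j 0 res (by omega)
      simpa using h
    · by_cases hjw : j < l.length
      · rw [aLoop]
        have hc : ¬ ((j : Nat) : Int) - ((0 : Nat) : Int) + 1 = ((m + 1 : Nat) : Int) := by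
          push_cast; omega
        simp only [dif_pos hjw, if_neg hc]
        have htake : l.take (j + 1) = l.take j ++ [l.getD j 0] := by
          rw [List.take_add_one]
          congr 1
          simp [List.getElem?_eq_getElem hjw, List.getD_eq_getElem?_getD]
        have hq1 : (if l.getD j 0 < 0
              then (l.take j).filter (fun x => x < 0) ++ [l.getD j 0]
              else (l.take j).filter (fun x => x < 0))
            = (l.take (j + 1)).filter (fun x => x < 0) := by
          rw [htake, List.filter_append]
          by_cases hx : l.getD j 0 < 0 <;>
            simp [List.getD_eq_getElem?_getD] at hx <;>
            simp [List.getD_eq_getElem?_getD, hx]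
        rw [hq1]
        exact ih (j + 1) res (by omega) (by omega) (by omega)
      · rw [aLoop]
        have hcnt : l.length - m = 0 := by omega
        simp [hjw, hcnt]

-- ===== VERDICT (by name: the statement is the Claim_ definition above) =====
theorem firstNegativeNumberInSubArrays_spec : Claim_equal_firstNegativeNumberInSubArrays := by
  intro list k _hdom
  unfold Spec_firstNegativeNumberInSubArrays firstNegativeNumberInSubArrays
    firstNegativeNumberInSubArrays_alt
  by_cases hk : k < 1
  · rw [aLoop_neg list k (by omega) 0 [] []]
    simp [hk]
  · obtain ⟨m, rfl⟩ : ∃ m : Nat, k = ((m + 1 : Nat) : Int) := ⟨k.toNat - 1, by omega⟩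
    have hA : aLoop list ((m + 1 : Nat) : Int) [] [] 0 0
        = (List.range' 0 (list.length - m)).map (winAns list (m + 1)) := by
      have h := aLoop_warm list m 0 [] (by omega) (by omega)
      simpa using h
    rw [hA]
    by_cases hbig : ((list.length : Nat) : Int) < ((m + 1 : Nat) : Int)
    · have hcnt : list.length - m = 0 := by omega
      rw [if_pos (Or.inr hbig), hcnt]
      simp
    · have hmn : m + 1 ≤ list.length := by omega
      simp only [if_neg (by push_cast at hbig ⊢; omega :
        ¬ (((m + 1 : Nat) : Int) < 1 ∨ ((list.length : Nat) : Int) < ((m + 1 : Nat) : Int)))]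
      have htn : (((m + 1 : Nat) : Int)).toNat = m + 1 := by omega
      rw [htn]
      have hcnt : list.length - (m + 1) + 1 = list.length - m := by omega
      rw [hcnt, List.range_eq_range']
      refine (List.map_congr_left ?_).symm
      intro s hs
      rw [List.mem_range'] at hs
      obtain ⟨idx, hidx, rfl⟩ := hs
      have hsle : 0 + 1 * idx ≤ list.length := by omega
      have hswin : 0 + 1 * idx + (m + 1) ≤ list.length := by omega
      rw [buildNxt_getD list 0 list.length _ (by omega) hsle]
      have hw := winAns_findIdx list (m + 1) (0 + 1 * idx)
      cases hfind : (list.drop (0 + 1 * idx)).findIdx? (fun x => decide (x < 0)) with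
      | none =>
        rw [hfind] at hw
        show (if list.length < 0 + 1 * idx + (m + 1) then list.getD list.length 0 else 0)
            = winAns list (m + 1) (0 + 1 * idx)
        rw [if_neg (by omega)]
        exact hw
      | some d =>
        rw [hfind] at hw
        have hz : 0 + (0 + 1 * idx) + d = 0 + 1 * idx + d := by omega
        show (if 0 + (0 + 1 * idx) + d < 0 + 1 * idx + (m + 1)
              then list.getD (0 + (0 + 1 * idx) + d) 0 else 0)
            = winAns list (m + 1) (0 + 1 * idx)
        rw [hz]
        exact hw
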